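-- pv_equiv track=rewrite | github.com/pokgopun/perlweeklychallenge-club | challenge-257/pokgopun/python/ch-2.py | removeBottomRowWithAllZeroes
-- ===== SOURCE A (Python) =====
-- def rowContainsAllZeroes(row: tuple):                        ### check if a row contains all zeros
--     return sum(
--             x!=0 for x in row
--             ) == 0
--
-- def removeBottomRowWithAllZeroes(matrix: tuple):             ### remove any bottom all-zeroes row
--     l = len(matrix)
--     lz = l
--     while l > 0:
--             l -= 1
--             if rowContainsAllZeroes(matrix[l]):
--                 matrix = matrix[:l]
--                 lz -= 1
--             if l != lz:                                      ### stop the removal process when all-zeroes row is no longer continously found from the bottom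
--                 break
--     return matrix
-- ===== SOURCE B (Python) =====
-- def removeBottomRowWithAllZeroes(matrix: tuple):
--     last = -1
--     for i, row in enumerate(matrix):
--         if not all(x == 0 for x in row):
--             last = i
--     return matrix[:last + 1]
-- ===== Notes on version B (the rewrite author's own statement) =====
-- stated objective: idiomatic
-- what changed: Replaced A's bottom-up while-loop that repeatedly reslices the tuple and tracks two counters with a single forward scan recording the last non-zero row index followed by one slice.
import Mathlib
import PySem

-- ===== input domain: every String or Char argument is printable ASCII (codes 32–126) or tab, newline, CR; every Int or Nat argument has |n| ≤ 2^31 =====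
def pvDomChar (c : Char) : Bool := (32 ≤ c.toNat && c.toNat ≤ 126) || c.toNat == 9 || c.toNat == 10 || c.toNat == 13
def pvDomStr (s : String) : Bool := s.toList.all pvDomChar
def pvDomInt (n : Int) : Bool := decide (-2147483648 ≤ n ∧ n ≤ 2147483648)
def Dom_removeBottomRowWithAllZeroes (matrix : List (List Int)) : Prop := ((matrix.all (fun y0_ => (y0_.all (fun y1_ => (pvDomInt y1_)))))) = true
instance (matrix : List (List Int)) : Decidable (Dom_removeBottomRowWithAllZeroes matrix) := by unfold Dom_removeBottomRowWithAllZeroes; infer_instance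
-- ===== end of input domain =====

-- B replaces A's bottom-up early-exit deletion loop by a single forward scan for the
-- last non-zero row followed by one slice (objective: idiomatic; same asymptotic cost).

-- ===== PORT A =====
-- sum(x != 0 for x in row) == 0
def rowContainsAllZeroes (row : List Int) : Bool :=
  (row.foldl (fun acc x => acc + (if x ≠ 0 then (1 : Int) else 0)) 0) == 0

-- the 'while l > 0' loop; fuel is the current value of l (it decreases by 1 each turn)
def removeLoop : List (List Int) → Nat → Nat → List (List Int)
  | matrix, 0, _ => matrix
  | matrix, Nat.succ l, lz =>
    match PySem.List.pyGet? matrix (l : Int) with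
    | none => matrix      -- unreachable: l < len(matrix) whenever the loop re-enters
    | some row =>
      if rowContainsAllZeroes row then
        let matrix' := PySem.List.slice matrix none (some (l : Int))
        let lz' := lz - 1
        if l ≠ lz' then matrix' else removeLoop matrix' l lz'
      else
        if l ≠ lz then matrix else removeLoop matrix l lz

def removeBottomRowWithAllZeroes (matrix : List (List Int)) : List (List Int) :=
  removeLoop matrix matrix.length matrix.length

-- ===== PORT B =====
def removeBottomRowWithAllZeroes_alt (matrix : List (List Int)) : List (List Int) :=
  let last : Int :=
    (PySem.List.enumerate matrix 0).foldl
      (fun last p => if !(p.2.all (fun x => x == 0)) then p.1 else last) (-1)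
  PySem.List.slice matrix none (some (last + 1))

-- ===== PRECONDITION & SPEC =====
def Spec_removeBottomRowWithAllZeroes (matrix : List (List Int)) (out : List (List Int)) : Prop := out = removeBottomRowWithAllZeroes_alt matrix
instance (matrix : List (List Int)) (out : List (List Int)) : Decidable (Spec_removeBottomRowWithAllZeroes matrix out) := by unfold Spec_removeBottomRowWithAllZeroes; infer_instance

-- ===== CLAIM (what is proved, stated in full; the proofs are below) =====
def Claim_equal_removeBottomRowWithAllZeroes : Prop := ∀ (matrix : List (List Int)), Dom_removeBottomRowWithAllZeroes matrix → Spec_removeBottomRowWithAllZeroes matrix (removeBottomRowWithAllZeroes matrix)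

-- ===== LEMMAS AND PROOFS =====

-- the common specification: drop the maximal all-zero suffix of rows
def gSpec (matrix : List (List Int)) : List (List Int) :=
  (matrix.reverse.dropWhile (fun r => r.all (fun x => x == 0))).reverse

theorem gSpec_concat (ms : List (List Int)) (r : List Int) :
    gSpec (ms ++ [r]) = if r.all (fun x => x == 0) then gSpec ms else ms ++ [r] := by
  unfold gSpec
  rw [List.reverse_append]
  simp only [List.reverse_cons, List.reverse_nil, List.nil_append]
  split_ifs with h <;> simp [h]

theorem count_shift (row : List Int) (acc : Int) :
    row.foldl (fun a x => a + (if x ≠ 0 then (1 : Int) else 0)) acc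
      = acc + row.foldl (fun a x => a + (if x ≠ 0 then (1 : Int) else 0)) 0 := by
  induction row generalizing acc with
  | nil => simp
  | cons x xs ih =>
    simp only [List.foldl]
    rw [ih, ih (0 + _)]
    ring

theorem count_nonneg (row : List Int) :
    0 ≤ row.foldl (fun a x => a + (if x ≠ 0 then (1 : Int) else 0)) 0 := by
  induction row with
  | nil => simp
  | cons x xs ih =>
    simp only [List.foldl]
    rw [count_shift]
    split_ifs <;> omega

theorem rowContainsAllZeroes_eq (row : List Int) :
    rowContainsAllZeroes row = row.all (fun x => x == 0) := by
  induction row with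
  | nil => rfl
  | cons x xs ih =>
    unfold rowContainsAllZeroes at *
    simp only [List.foldl, List.all_cons]
    rw [count_shift]
    have h := count_nonneg xs
    by_cases hx : x = 0
    · simpa [hx] using ih
    · have hs : (if x ≠ 0 then (1 : Int) else 0) = 1 := by simp [hx]
      rw [hs]
      have hne : ¬ ((0 : Int) + 1 + xs.foldl (fun a x => a + (if x ≠ 0 then (1 : Int) else 0)) 0 = 0) := by omega
      rw [show (x == 0) = false from by simp [hx], Bool.false_and]
      simp only [beq_eq_false_iff_ne, ne_eq]
      exact hne

-- A equals gSpec
theorem removeLoop_eq (matrix : List (List Int)) :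
    removeLoop matrix matrix.length matrix.length = gSpec matrix := by
  induction matrix using List.reverseRecOn with
  | nil => rfl
  | append_singleton ms r ih =>
    have hlen : (ms ++ [r]).length = ms.length + 1 := by simp
    rw [hlen]
    unfold removeLoop
    have hget : PySem.List.pyGet? (ms ++ [r]) ((ms.length : Nat) : Int) = some r := by
      simp
    rw [hget]
    simp only [rowContainsAllZeroes_eq]
    rw [gSpec_concat]
    by_cases hr : r.all (fun x => x == 0)
    · have hslice : PySem.List.slice (ms ++ [r]) none (some ((ms.length : Nat) : Int)) = ms := by
        rw [PySem.List.slice_to_natCast]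
        simp
      simp only [hr, if_pos, Nat.add_sub_cancel, ne_eq, not_true_eq_false, if_false,
        hslice]
      simpa [hslice] using ih
    · simp [hr]

-- the forward-scan index of B
def lastIdx (matrix : List (List Int)) : Int :=
  (PySem.List.enumerate matrix 0).foldl
    (fun last p => if !(p.2.all (fun x => x == 0)) then p.1 else last) (-1)

theorem lastIdx_bound_aux (m : List (List Int)) (s a : Int) (h : a < s) :
    a ≤ (PySem.List.enumerate m s).foldl
          (fun last p => if !(p.2.all (fun x => x == 0)) then p.1 else last) a
    ∧ (PySem.List.enumerate m s).foldl
          (fun last p => if !(p.2.all (fun x => x == 0)) then p.1 else last) a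
        < s + m.length := by
  induction m generalizing s a with
  | nil => simpa using h
  | cons x xs ih =>
    rw [PySem.List.enumerate_cons]
    simp only [List.foldl, List.length_cons]
    by_cases hx : x.all (fun y => y == 0)
    · have := ih (s + 1) a (by omega)
      simp only [hx, Bool.not_true] at *
      constructor
      · exact this.1
      · have := this.2; push_cast at this ⊢; omega
    · have := ih (s + 1) s (by omega)
      simp only [hx, Bool.not_false, if_pos] at *
      constructor
      · omega
      · have := this.2; push_cast at this ⊢; omega

theorem lastIdx_bound (m : List (List Int)) :
    -1 ≤ lastIdx m ∧ lastIdx m < m.length := by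
  have := lastIdx_bound_aux m 0 (-1) (by omega)
  unfold lastIdx
  exact ⟨this.1, by simpa using this.2⟩

theorem lastIdx_concat (ms : List (List Int)) (r : List Int) :
    lastIdx (ms ++ [r])
      = if r.all (fun x => x == 0) then lastIdx ms else (ms.length : Int) := by
  unfold lastIdx
  rw [PySem.List.enumerate_append, List.foldl_append]
  simp only [PySem.List.enumerate_cons, PySem.List.enumerate_nil, List.foldl,
    Int.zero_add]
  by_cases hr : r.all (fun x => x == 0) <;> simp [hr]

theorem alt_eq_take (m : List (List Int)) :
    removeBottomRowWithAllZeroes_alt m = m.take (lastIdx m + 1).toNat := by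
  unfold removeBottomRowWithAllZeroes_alt
  have h := (lastIdx_bound m).1
  rw [PySem.List.slice_to _ (by unfold lastIdx at *; omega)]
  rfl

-- B equals gSpec
theorem alt_eq (matrix : List (List Int)) :
    removeBottomRowWithAllZeroes_alt matrix = gSpec matrix := by
  induction matrix using List.reverseRecOn with
  | nil => rfl
  | append_singleton ms r ih =>
    rw [alt_eq_take, gSpec_concat, lastIdx_concat]
    by_cases hr : r.all (fun x => x == 0)
    · have hb := (lastIdx_bound ms).2
      have hle : (lastIdx ms + 1).toNat ≤ ms.length := by omega
      rw [if_pos hr, if_pos hr, List.take_append_of_le_length hle, ← alt_eq_take, ih]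
    · rw [if_neg hr, if_neg hr]
      have : ((ms.length : Int) + 1).toNat = (ms ++ [r]).length := by simp
      rw [this, List.take_length]

-- ===== VERDICT (by name: the statement is the Claim_ definition above) =====
theorem removeBottomRowWithAllZeroes_spec : Claim_equal_removeBottomRowWithAllZeroes := by
  intro matrix _
  unfold Spec_removeBottomRowWithAllZeroes removeBottomRowWithAllZeroes
  rw [removeLoop_eq, alt_eq]
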